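-- pv_equiv track=rewrite | github.com/boost-devs/coding-test-study | peacecheejecake/programmers/12899_124나라의숫자.py | solution
-- ===== SOURCE A (Python) =====
-- def solution(n):
--     nn = n
--     num_digit = 0
--     while nn > 0:
--         num_digit += 1
--         nn -= 3 ** num_digit
--
--     n -= (3 ** num_digit - 3) // 2 + 1
--     ternary = ''
--     while n > 0:
--         n, r = divmod(n, 3)
--         ternary = str(r) + ternary
--     return (
--         ternary
--         .rjust(num_digit, '0')
--         .replace('2', '4')
--         .replace('1', '2')
--         .replace('0', '1')
--     )
-- ===== SOURCE B (Python) =====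
-- def solution(n):
--     # Bijective base-3: one loop, no digit-count pass, no padding, no replace chain.
--     ans = ''
--     while n > 0:
--         n, r = divmod(n, 3)
--         if r == 0:
--             r = 3
--             n -= 1
--         ans = '124'[r - 1] + ans
--     return ans
-- ===== Notes on version B (the rewrite author's own statement) =====
-- stated objective: idiomatic
-- what changed: Replaced A's two-phase approach (digit-count loop with powers of 3, offset subtraction, plain base-3 loop, rjust padding, three chained replaces) by one bijective base-3 loop that emits '124'[r-1] directly with a borrow when the remainder is 0.
import Mathlib
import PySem

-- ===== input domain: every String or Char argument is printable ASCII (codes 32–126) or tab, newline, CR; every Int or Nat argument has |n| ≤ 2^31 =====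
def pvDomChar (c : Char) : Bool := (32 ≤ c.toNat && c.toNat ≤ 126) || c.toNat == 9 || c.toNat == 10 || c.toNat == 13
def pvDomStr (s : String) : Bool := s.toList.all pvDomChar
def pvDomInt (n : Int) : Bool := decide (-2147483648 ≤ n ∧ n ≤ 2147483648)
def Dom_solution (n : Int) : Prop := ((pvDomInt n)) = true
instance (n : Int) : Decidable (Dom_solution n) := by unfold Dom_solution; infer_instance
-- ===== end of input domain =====

-- B replaces A's digit-count pass, offset subtraction, rjust padding and three replace passes
-- with a single bijective base-3 loop (idiomatic one-pass form); same return value for every n.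

-- ===== PORT A =====

-- needed by the ports' termination proofs (cited in decreasing_by)
theorem pv_three_le_pow (d : Nat) : (3 : Int) ≤ 3 ^ (d + 1) := by
  calc (3 : Int) = 3 ^ 1 := by ring
    _ ≤ 3 ^ (d + 1) := by
        apply pow_le_pow_right₀ (by norm_num) (by omega)

theorem pv_floordiv3_lt (n : Int) (h : 0 < n) :
    (PySem.Int.floordiv n 3).toNat < n.toNat ∧ 0 ≤ PySem.Int.floordiv n 3 := by
  rw [PySem.Int.floordiv_eq_ediv_of_pos (by norm_num)]
  omega

-- the first while loop of A: counts digits, consuming 3^1, 3^2, …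
def digitLoop (nn : Int) (d : Nat) : Nat :=
  if 0 < nn then digitLoop (nn - 3 ^ (d + 1)) (d + 1) else d
termination_by nn.toNat
decreasing_by have := pv_three_le_pow d; omega

-- the second while loop of A: base-3 digits of n, prepended to the accumulator
-- (str(r) ported as PySem.Int.toChars; strings handled as their char lists throughout)
def ternLoop (n : Int) (acc : List Char) : List Char :=
  if 0 < n then
    ternLoop (PySem.Int.floordiv n 3) (PySem.Int.toChars (PySem.Int.mod n 3) ++ acc)
  else acc
termination_by n.toNat
decreasing_by have := pv_floordiv3_lt n (by omega); omega

-- hand port of str.rjust(w, c): exact (left-pad with c to width w)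
def pyRjust (l : List Char) (w : Nat) (c : Char) : List Char :=
  if l.length < w then List.replicate (w - l.length) c ++ l else l

-- hand port of str.replace(old, new) for ONE-character old/new: exact on that case
-- (Python replaces each occurrence of the single char; that is exactly a map)
def replace1 (l : List Char) (a b : Char) : List Char :=
  l.map (fun c => if c = a then b else c)

def solution (n : Int) : String :=
  let d := digitLoop n 0
  let n2 := n - (PySem.Int.floordiv ((3 : Int) ^ d - 3) 2 + 1)
  let t := ternLoop n2 []
  String.mk (replace1 (replace1 (replace1 (pyRjust t d '0') '2' '4') '1' '2') '0' '1')

-- ===== PORT B =====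

-- B's single while loop: bijective base-3 with borrow, '124'[r-1] prepended
def altLoop (n : Int) (ans : List Char) : List Char :=
  if 0 < n then
    let q := PySem.Int.floordiv n 3
    let r := PySem.Int.mod n 3
    let q' := if r = 0 then q - 1 else q
    let r' := if r = 0 then (3 : Int) else r
    altLoop q' (match PySem.Str.pyGet? "124" (r' - 1) with
                | some c => c :: ans
                | none => ans)
  else ans
termination_by n.toNat
decreasing_by
  have h3 := pv_floordiv3_lt n (by omega)
  rcases h3 with ⟨hlt, hge⟩
  split <;> omega

def solution_alt (n : Int) : String := String.mk (altLoop n [])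

-- ===== PRECONDITION & SPEC =====
def Spec_solution (n : Int) (out : String) : Prop := out = solution_alt n
instance (n : Int) (out : String) : Decidable (Spec_solution n out) := by unfold Spec_solution; infer_instance

-- ===== CLAIM (what is proved, stated in full; the proofs are below) =====
def Claim_equal_solution : Prop := ∀ (n : Int), Dom_solution n → Spec_solution n (solution n)

-- ===== LEMMAS AND PROOFS =====

-- canonical form both ports are reduced to: the d digits of m (0 ≤ m < 3^d) in base 3,
-- most significant first, mapped 0↦'1', 1↦'2', 2↦'4'
def mapc (r : Int) : Char := if r = 0 then '1' else if r = 1 then '2' else '4'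

def canon (m : Int) : Nat → List Char
  | 0 => []
  | d + 1 => canon (m / 3) d ++ [mapc (m % 3)]

-- raw (pre-replace) form: chars '0'/'1'/'2'
def rawc (r : Int) : Char := if r = 0 then '0' else if r = 1 then '1' else '2'

def canonRaw (m : Int) : Nat → List Char
  | 0 => []
  | d + 1 => canonRaw (m / 3) d ++ [rawc (m % 3)]

theorem canonRaw_zero : ∀ d, canonRaw 0 d = List.replicate d '0' := by
  intro d
  induction d with
  | zero => rfl
  | succ d ih =>
      show canonRaw 0 d ++ [rawc 0] = _
      rw [ih]
      simp [rawc, List.replicate_succ']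

theorem digitLoop_spec : ∀ (nn : Int) (d : Nat), 0 < nn →
    d < digitLoop nn d ∧ 2 * nn ≤ 3 ^ (digitLoop nn d + 1) - 3 ^ (d + 1) ∧
      3 ^ (digitLoop nn d) - 3 ^ (d + 1) < 2 * nn := by
  intro nn d h
  induction nn, d using digitLoop.induct with
  | case1 nn d hpos ih =>
      rw [digitLoop, if_pos hpos]
      by_cases h2 : 0 < nn - 3 ^ (d + 1)
      · obtain ⟨ih1, ih2, ih3⟩ := ih h2
        have hp : (3 : Int) ^ (d + 1 + 1) = 3 * 3 ^ (d + 1) := by ring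
        refine ⟨by omega, by omega, by omega⟩
      · rw [digitLoop, if_neg h2]
        have hp : (3 : Int) ^ (d + 1 + 1) = 3 * 3 ^ (d + 1) := by ring
        refine ⟨by omega, by omega, by omega⟩
  | case2 nn d hpos => omega

theorem digitLoop_of_nonpos (nn : Int) (d : Nat) (h : ¬ 0 < nn) : digitLoop nn d = d := by
  rw [digitLoop, if_neg h]

-- the digit-count interval determines digitLoop n 0 uniquely
theorem digitLoop_eq (n : Int) (e : Nat) (h1 : 0 < n)
    (h2 : 3 ^ e - 3 < 2 * n) (h3 : 2 * n ≤ 3 ^ (e + 1) - 3) : digitLoop n 0 = e := by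
  obtain ⟨c1, c2, c3⟩ := digitLoop_spec n 0 h1
  set d := digitLoop n 0 with hd
  by_contra hne
  rcases Nat.lt_or_ge d e with hlt | hge
  · have hle : d + 1 ≤ e := hlt
    have : (3 : Int) ^ (d + 1) ≤ 3 ^ e := pow_le_pow_right₀ (by norm_num) hle
    norm_num at c2
    omega
  · have hlt' : e < d := by omega
    have hle : e + 1 ≤ d := hlt'
    have : (3 : Int) ^ (e + 1) ≤ 3 ^ d := pow_le_pow_right₀ (by norm_num) hle
    norm_num at c3
    omega

theorem ternLoop_acc : ∀ (N : Nat) (n : Int) (acc : List Char), n.toNat ≤ N →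
    ternLoop n acc = ternLoop n [] ++ acc := by
  intro N
  induction N with
  | zero =>
      intro n acc h
      have hn : ¬ 0 < n := by omega
      rw [ternLoop, if_neg hn, ternLoop, if_neg hn]
      exact (List.nil_append acc).symm
  | succ N ih =>
      intro n acc h
      by_cases hn : 0 < n
      · have hlt := pv_floordiv3_lt n hn
        rw [ternLoop, if_pos hn]
        conv_rhs => rw [ternLoop, if_pos hn]
        rw [ih _ _ (by omega), ih _ (PySem.Int.toChars (PySem.Int.mod n 3) ++ []) (by omega)]
        simp
      · rw [ternLoop, if_neg hn, ternLoop, if_neg hn]; simp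

theorem altLoop_acc : ∀ (N : Nat) (n : Int) (ans : List Char), n.toNat ≤ N →
    altLoop n ans = altLoop n [] ++ ans := by
  intro N
  induction N with
  | zero =>
      intro n ans h
      have hn : ¬ 0 < n := by omega
      rw [altLoop, if_neg hn, altLoop, if_neg hn]
      exact (List.nil_append ans).symm
  | succ N ih =>
      intro n ans h
      by_cases hn : 0 < n
      · have hlt := pv_floordiv3_lt n hn
        rw [altLoop, if_pos hn]
        conv_rhs => rw [altLoop, if_pos hn]
        simp only
        have hq : ((if PySem.Int.mod n 3 = 0 then PySem.Int.floordiv n 3 - 1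
            else PySem.Int.floordiv n 3)).toNat ≤ N := by split <;> omega
        rw [ih _ _ hq, ih _ (match PySem.Str.pyGet? "124"
          ((if PySem.Int.mod n 3 = 0 then (3:Int) else PySem.Int.mod n 3) - 1) with
          | some c => c :: ([] : List Char) | none => ([] : List Char)) hq]
        cases PySem.Str.pyGet? "124"
          ((if PySem.Int.mod n 3 = 0 then (3:Int) else PySem.Int.mod n 3) - 1) <;> simp
      · rw [altLoop, if_neg hn, altLoop, if_neg hn]; simp

-- ternLoop padded to d digits is exactly canonRaw, and its length is ≤ d, for 0 ≤ m ≤ 3^d - 1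
theorem tern_pad : ∀ (d : Nat) (m : Int), 0 ≤ m → m ≤ 3 ^ d - 1 →
    (ternLoop m []).length ≤ d ∧
      List.replicate (d - (ternLoop m []).length) '0' ++ ternLoop m [] = canonRaw m d := by
  intro d
  induction d with
  | zero =>
      intro m h0 h1
      have h3 : (3:Int) ^ 0 = 1 := pow_zero 3
      have hm : m = 0 := by omega
      subst hm
      rw [ternLoop, if_neg (by norm_num)]
      exact ⟨by simp, by simp [canonRaw]⟩
  | succ d ih =>
      intro m h0 h1
      by_cases hm : 0 < m
      · have hfd : PySem.Int.floordiv m 3 = m / 3 :=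
          PySem.Int.floordiv_eq_ediv_of_pos (by norm_num)
        have hmd : PySem.Int.mod m 3 = m % 3 :=
          PySem.Int.mod_eq_emod_of_pos (by norm_num)
        have hp : (3 : Int) ^ (d + 1) = 3 * 3 ^ d := by ring
        have hq0 : 0 ≤ m / 3 := by omega
        have hq1 : m / 3 ≤ 3 ^ d - 1 := by omega
        obtain ⟨ihl, ihe⟩ := ih (m / 3) hq0 hq1
        have hchars : PySem.Int.toChars (m % 3) = [rawc (m % 3)] := by
          have h3 : m % 3 = 0 ∨ m % 3 = 1 ∨ m % 3 = 2 := by omega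
          rcases h3 with h | h | h <;> rw [h] <;> rfl
        rw [ternLoop, if_pos hm, hfd, hmd, hchars,
          ternLoop_acc (m / 3).toNat (m / 3) _ (le_refl _)]
        constructor
        · simp; omega
        · show List.replicate (d + 1 - _) '0' ++ _ = canonRaw (m / 3) d ++ [rawc (m % 3)]
          rw [← ihe]
          simp only [List.append_nil, List.length_append, List.length_cons, List.length_nil]
          have hsub : d + 1 - ((ternLoop (m / 3) []).length + (0 + 1))
              = d - (ternLoop (m / 3) []).length := by omega
          rw [hsub, List.append_assoc]
      · have hm0 : m = 0 := by omega
        subst hm0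
        rw [ternLoop, if_neg (by norm_num)]
        refine ⟨by simp, ?_⟩
        simp [canonRaw_zero]
  -- (note: canonRaw 0 (d+1) = replicate (d+1) '0' via canonRaw_zero)

-- the three chained single-char replaces turn canonRaw into canon
theorem repl_canon : ∀ (d : Nat) (m : Int),
    replace1 (replace1 (replace1 (canonRaw m d) '2' '4') '1' '2') '0' '1' = canon m d := by
  intro d
  induction d with
  | zero => intro m; rfl
  | succ d ih =>
      intro m
      show replace1 (replace1 (replace1 (canonRaw (m / 3) d ++ [rawc (m % 3)]) _ _) _ _) _ _
        = canon (m / 3) d ++ [mapc (m % 3)]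
      simp only [replace1, List.map_append] at *
      rw [ih]
      congr 1
      have h3 : m % 3 = 0 ∨ m % 3 = 1 ∨ m % 3 = 2 := by
        have := Int.emod_nonneg m (by norm_num : (3:Int) ≠ 0)
        have := Int.emod_lt_of_pos m (by norm_num : (0:Int) < 3)
        omega
      rcases h3 with h | h | h <;> rw [h] <;> rfl

-- A, reduced to canonical form, for positive n
theorem solution_canon (n : Int) (hn : 0 < n) :
    solution n = String.mk (canon (n - (((3:Int) ^ (digitLoop n 0) - 3) / 2 + 1)) (digitLoop n 0)) := by
  obtain ⟨c1, c2, c3⟩ := digitLoop_spec n 0 hn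
  set d := digitLoop n 0 with hd
  have hodd : (3 : Int) ^ d % 2 = 1 := Int.odd_iff.mp (Odd.pow ⟨1, by norm_num⟩)
  have hpow3 : (0:Int) < 3 ^ d := by positivity
  have hfd : PySem.Int.floordiv ((3:Int) ^ d - 3) 2 = ((3:Int) ^ d - 3) / 2 :=
    PySem.Int.floordiv_eq_ediv_of_pos (by norm_num)
  set m := n - (((3:Int) ^ d - 3) / 2 + 1) with hm
  have hp : (3 : Int) ^ (d + 1) = 3 * 3 ^ d := by ring
  norm_num at c2 c3
  have hm0 : 0 ≤ m := by omega
  have hm1 : m ≤ 3 ^ d - 1 := by omega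
  obtain ⟨hlen, hpad⟩ := tern_pad d m hm0 hm1
  show String.mk (replace1 (replace1 (replace1 (pyRjust (ternLoop
      (n - (PySem.Int.floordiv ((3:Int) ^ d - 3) 2 + 1)) []) d '0') '2' '4') '1' '2') '0' '1') = _
  rw [hfd, ← hm]
  have hrj : pyRjust (ternLoop m []) d '0'
      = List.replicate (d - (ternLoop m []).length) '0' ++ ternLoop m [] := by
    unfold pyRjust
    split
    · rfl
    · have : (ternLoop m []).length = d := by omega
      simp [this]
  rw [hrj, hpad, repl_canon]

-- B, reduced to canonical form, for every n (strong induction on n)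
theorem altLoop_canon : ∀ (N : Nat) (n : Int), n.toNat ≤ N → 0 < n →
    altLoop n [] = canon (n - (((3:Int) ^ (digitLoop n 0) - 3) / 2 + 1)) (digitLoop n 0) := by
  intro N
  induction N with
  | zero => intro n h hn; omega
  | succ N ih =>
      intro n h hn
      obtain ⟨c1, c2, c3⟩ := digitLoop_spec n 0 hn
      set d := digitLoop n 0 with hd
      norm_num at c2 c3
      have hd1 : 1 ≤ d := c1
      have hodd : (3 : Int) ^ d % 2 = 1 := Int.odd_iff.mp (Odd.pow ⟨1, by norm_num⟩)
      -- write 3^d = 3 * y with y = 3^(d-1) odd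
      obtain ⟨d', hd'⟩ : ∃ d', d = d' + 1 := ⟨d - 1, by omega⟩
      set y : Int := 3 ^ d' with hy
      have hyodd : y % 2 = 1 := Int.odd_iff.mp (Odd.pow ⟨1, by norm_num⟩)
      have hpy : (3 : Int) ^ d = 3 * y := by rw [hd']; ring
      have hpy1 : (3 : Int) ^ (d + 1) = 9 * y := by rw [hd']; ring
      have hypos : (0:Int) < y := by positivity
      have hfd : PySem.Int.floordiv n 3 = n / 3 :=
        PySem.Int.floordiv_eq_ediv_of_pos (by norm_num)
      have hmd : PySem.Int.mod n 3 = n % 3 :=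
        PySem.Int.mod_eq_emod_of_pos (by norm_num)
      set m := n - (((3:Int) ^ d - 3) / 2 + 1) with hm
      -- one step of B's loop
      rw [altLoop, if_pos hn]
      simp only [hfd, hmd]
      set q' : Int := if n % 3 = 0 then n / 3 - 1 else n / 3 with hq'
      set r' : Int := if n % 3 = 0 then (3:Int) else n % 3 with hr'
      have hqr : n = 3 * q' + r' ∧ (r' = 1 ∨ r' = 2 ∨ r' = 3) := by
        rw [hq', hr']
        by_cases h0 : n % 3 = 0
        · rw [if_pos h0, if_pos h0]; omega
        · rw [if_neg h0, if_neg h0]; omega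
      obtain ⟨hn3, hr3⟩ := hqr
      have hr1 : 1 ≤ r' ∧ r' ≤ 3 := by rcases hr3 with h | h | h <;> omega
      have hacc := altLoop_acc q'.toNat q'
        (match PySem.Str.pyGet? "124" (r' - 1) with
          | some c => c :: ([] : List Char) | none => ([] : List Char)) (le_refl _)
      rw [hacc]
      -- the prepended character is mapc (m % 3)
      have hmmod : m % 3 = r' - 1 := by omega
      have hchar : (match PySem.Str.pyGet? "124" (r' - 1) with
          | some c => c :: ([] : List Char) | none => ([] : List Char)) = [mapc (m % 3)] := by
        rw [hmmod]
        rcases hr3 with h | h | h <;> rw [h] <;> rfl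
      rw [hchar]
      by_cases hq : 0 < q'
      · -- digit count of q' is d - 1 = d'
        have hc2 : 2 * n ≤ 9 * y - 3 := by rw [hpy1] at c2; exact c2
        have hc3 : 3 * y - 3 < 2 * n := by rw [hpy] at c3; exact c3
        have e2 : (3:Int) ^ (d' + 1) = 3 * y := by rw [hy]; ring
        -- 6q' ≤ 9y - 3 - 2r' ≤ 9y - 5, and 6 ∣ 6q', 6 ∣ 9y - 9 (y odd)
        have hq2 : (3:Int) ^ d' - 3 < 2 * q' ∧ 2 * q' ≤ 3 ^ (d' + 1) - 3 := by
          rw [← hy, e2]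
          omega
        have hdq : digitLoop q' 0 = d' := digitLoop_eq q' d' hq hq2.1 hq2.2
        have hqN : q'.toNat ≤ N := by omega
        rw [ih q' hqN hq, hdq]
        -- m / 3 is q's m-value
        have hmq : q' - (((3:Int) ^ d' - 3) / 2 + 1) = m / 3 := by
          rw [← hy, hm, hpy]
          omega
        rw [hmq, hd']
        show canon (m / 3) d' ++ [mapc (m % 3)] = canon (m / 3) d' ++ [mapc (m % 3)]
        rfl
      · -- q' ≤ 0 : n ≤ 3, d = 1
        have hgd : d = 1 := by
          by_contra hcon
          have h2d : 2 ≤ d := by omega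
          have : (9:Int) ≤ 3 ^ d := by
            calc (9:Int) = 3 ^ 2 := by norm_num
              _ ≤ 3 ^ d := pow_le_pow_right₀ (by norm_num) h2d
          omega
        rw [altLoop, if_neg hq, hgd]
        have hm3 : m = m % 3 := by
          rw [hgd] at hm
          norm_num at hm
          omega
        show ([] : List Char) ++ [mapc (m % 3)] = canon (m / 3) 0 ++ [mapc (m % 3)]
        rfl

-- ===== VERDICT (by name: the statement is the Claim_ definition above) =====
theorem solution_spec : Claim_equal_solution := by
  intro n _
  unfold Spec_solution solution_alt
  by_cases hn : 0 < n
  · rw [solution_canon n hn, altLoop_canon n.toNat n (le_refl _) hn]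
  · rw [altLoop, if_neg hn]
    show solution n = String.mk []
    unfold solution
    rw [digitLoop_of_nonpos n 0 hn]
    norm_num
    rw [ternLoop, if_neg (by simpa using hn)]
    rfl
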